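-- pv_equiv track=rewrite | github.com/evilpsoc/r1000-network-panel | backend/app/main.py | parse_led_trigger
-- ===== SOURCE A (Python) =====
-- def parse_led_trigger(raw: str) -> tuple[str, list[str]]:
--     current = ""
--     available = []
--     for token in raw.split():
--         if token.startswith("[") and token.endswith("]"):
--             current = token[1:-1]
--             available.append(current)
--         else:
--             available.append(token)
--     return current, available
-- ===== SOURCE B (Python) =====
-- def _flush(tok, current, available):
--     if tok[0] == "[" and tok[-1] == "]":
--         inner = "".join(tok[1:-1])
--         available.append(inner)
--         return inner
--     available.append("".join(tok))
--     return current
--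
--
-- def parse_led_trigger(raw: str) -> tuple[str, list[str]]:
--     current = ""
--     available = []
--     tok = []
--     for ch in raw:
--         if ch.isspace():
--             if tok:
--                 current = _flush(tok, current, available)
--                 tok = []
--         else:
--             tok.append(ch)
--     if tok:
--         current = _flush(tok, current, available)
--     return current, available
-- ===== Notes on version B (the rewrite author's own statement) =====
-- stated objective: alternative
-- what changed: Replaces A's split()-then-token-loop with a single character-level scanner that builds each token itself and flushes it (via a helper) at whitespace boundaries, never calling split/startswith/endswith.
import Mathlib
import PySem

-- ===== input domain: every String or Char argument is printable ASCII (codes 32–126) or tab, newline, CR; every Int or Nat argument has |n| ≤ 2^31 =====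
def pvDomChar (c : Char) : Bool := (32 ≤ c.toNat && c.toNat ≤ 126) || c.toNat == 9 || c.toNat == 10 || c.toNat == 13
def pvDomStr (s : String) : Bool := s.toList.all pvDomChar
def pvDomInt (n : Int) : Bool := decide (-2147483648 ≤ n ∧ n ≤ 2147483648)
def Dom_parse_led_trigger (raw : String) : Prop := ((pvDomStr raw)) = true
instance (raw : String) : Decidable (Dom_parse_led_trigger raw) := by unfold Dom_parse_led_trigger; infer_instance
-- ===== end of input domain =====

-- B replaces A's split()-then-token-loop with a single character-level scanner that builds each
-- token itself and flushes it at whitespace boundaries; alternative decomposition, same O(n) cost.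

-- ===== PORT A =====
def parse_led_trigger (raw : String) : String × List String :=
  (PySem.Str.split₀ raw).foldl
    (fun (st : String × List String) (token : String) =>
      if PySem.Str.startswith token "[" && PySem.Str.endswith token "]" then
        let current := PySem.Str.slice token (some 1) (some (-1))
        (current, st.2 ++ [current])
      else
        (st.1, st.2 ++ [token]))
    ("", [])

-- ===== PORT B =====
-- _flush: tok is nonempty at every call site, so Python's tok[0]/tok[-1] cannot raise;
-- they are ported as pyGet? tok 0 / pyGet? tok (-1).
def pvFlush (tok : List Char) (st : String × List String) : String × List String :=
  if PySem.List.pyGet? tok 0 == some '[' && PySem.List.pyGet? tok (-1) == some ']' then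
    let inner := String.ofList (PySem.List.slice tok (some 1) (some (-1)))
    (inner, st.2 ++ [inner])
  else
    (st.1, st.2 ++ [String.ofList tok])

-- the for-loop over raw's characters, with the trailing 'if tok: flush' in the [] case
def pvScan : List Char → List Char → String × List String → String × List String
  | [], tok, st => if tok.isEmpty then st else pvFlush tok st
  | c :: rest, tok, st =>
    if PySem.Chars.isspace c then
      if tok.isEmpty then pvScan rest [] st else pvScan rest [] (pvFlush tok st)
    else
      pvScan rest (tok ++ [c]) st

def parse_led_trigger_alt (raw : String) : String × List String :=
  pvScan raw.toList [] ("", [])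

-- ===== PRECONDITION & SPEC =====
def Spec_parse_led_trigger (raw : String) (out : String × List String) : Prop := out = parse_led_trigger_alt raw
instance (raw : String) (out : String × List String) : Decidable (Spec_parse_led_trigger raw out) := by unfold Spec_parse_led_trigger; infer_instance

-- ===== CLAIM (what is proved, stated in full; the proofs are below) =====
def Claim_equal_parse_led_trigger : Prop := ∀ (raw : String), Dom_parse_led_trigger raw → Spec_parse_led_trigger raw (parse_led_trigger raw)

-- ===== LEMMAS AND PROOFS =====

-- A's per-token fold body, named for the proofs
def pvStepA (st : String × List String) (token : String) : String × List String :=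
  if PySem.Str.startswith token "[" && PySem.Str.endswith token "]" then
    let current := PySem.Str.slice token (some 1) (some (-1))
    (current, st.2 ++ [current])
  else
    (st.1, st.2 ++ [token])

lemma pv_pyGet_zero (tok : List Char) : PySem.List.pyGet? tok 0 = tok.head? := by
  cases tok <;> simp [PySem.List.pyGet?, PySem.List.pyIdx?]

lemma pv_pyGet_neg_one (tok : List Char) : PySem.List.pyGet? tok (-1) = tok.getLast? := by
  cases tok with
  | nil => simp [PySem.List.pyGet?, PySem.List.pyIdx?]
  | cons c cs =>
    simp [PySem.List.pyGet?, PySem.List.pyIdx?]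
    rw [List.getLast?_eq_getElem?]
    simp

lemma pv_startswith_head (tok : List Char) (x : Char) :
    PySem.Chars.startswith tok [x] = (tok.head? == some x) := by
  cases tok with
  | nil => simp [PySem.Chars.startswith]
  | cons c cs =>
    simp only [PySem.Chars.startswith, List.isPrefixOf, List.head?_cons]
    by_cases h : c = x
    · simp [h]
    · have h' : ¬ x = c := fun hx => h hx.symm
      simp [h, h']

lemma pv_endswith_last (tok : List Char) (x : Char) :
    PySem.Chars.endswith tok [x] = (tok.getLast? == some x) := by
  have : PySem.Chars.endswith tok [x] = PySem.Chars.startswith tok.reverse [x] := by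
    simp [PySem.Chars.endswith, PySem.Chars.startswith, List.isSuffixOf]
  rw [this, pv_startswith_head, List.head?_reverse]

lemma pv_flush_eq (tok : List Char) (st : String × List String) :
    pvFlush tok st = pvStepA st (String.ofList tok) := by
  unfold pvFlush pvStepA
  have hcond : (PySem.List.pyGet? tok 0 == some '[' && PySem.List.pyGet? tok (-1) == some ']')
      = (PySem.Str.startswith (String.ofList tok) "[" && PySem.Str.endswith (String.ofList tok) "]") := by
    simp [PySem.Str.startswith, PySem.Str.endswith, pv_startswith_head, pv_endswith_last,
      pv_pyGet_zero, pv_pyGet_neg_one]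
  rw [hcond]
  split
  · simp [PySem.Str.slice]
  · rfl

-- split₀.go with a nonempty accumulator just prepends it (reversed)
lemma pv_go_acc (cs : List Char) : ∀ cur acc,
    PySem.Chars.split₀.go cs cur acc = acc.reverse ++ PySem.Chars.split₀.go cs cur [] := by
  induction cs with
  | nil =>
    intro cur acc
    rw [PySem.Chars.split₀.go, PySem.Chars.split₀.go]
    by_cases h : cur.isEmpty <;> simp [h]
  | cons c rest ih =>
    intro cur acc
    rw [PySem.Chars.split₀.go, PySem.Chars.split₀.go]
    by_cases hs : PySem.Chars.isspace c
    · by_cases h : cur.isEmpty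
      · simp only [hs, h, if_true]
        exact ih [] acc
      · simp only [hs, h, if_true, if_false, Bool.false_eq_true]
        rw [ih [] (cur.reverse :: acc), ih [] [cur.reverse]]
        simp
    · simp only [hs, Bool.false_eq_true, if_false]
      exact ih (c :: cur) acc

-- the scanner computes A's fold over the tokens split₀ would produce
lemma pv_scan_eq (cs : List Char) : ∀ (tok : List Char) (st : String × List String),
    pvScan cs tok st
      = ((PySem.Chars.split₀.go cs tok.reverse []).map String.ofList).foldl pvStepA st := by
  induction cs with
  | nil =>
    intro tok st
    rw [PySem.Chars.split₀.go]
    by_cases h : tok.isEmpty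
    · simp [pvScan, List.isEmpty_iff.mp h]
    · have h' : ¬ tok.reverse.isEmpty = true := by simpa [List.isEmpty_iff] using h
      simp [pvScan, h, h', pv_flush_eq]
  | cons c rest ih =>
    intro tok st
    rw [PySem.Chars.split₀.go]
    by_cases hs : PySem.Chars.isspace c
    · by_cases h : tok.isEmpty
      · have : tok = [] := List.isEmpty_iff.mp h
        subst this
        simp only [pvScan, hs, if_true, List.isEmpty_nil, List.reverse_nil]
        exact ih [] st
      · have h' : ¬ tok.reverse.isEmpty = true := by simpa [List.isEmpty_iff] using h
        simp only [pvScan, hs, if_true, h, if_false, h', Bool.false_eq_true,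
          List.reverse_reverse]
        rw [pv_go_acc rest [] [tok], ih [] (pvFlush tok st)]
        simp [pv_flush_eq]
    · simp only [pvScan, hs, Bool.false_eq_true, if_false]
      rw [ih (tok ++ [c]) st]
      simp

-- ===== VERDICT (by name: the statement is the Claim_ definition above) =====
theorem parse_led_trigger_spec : Claim_equal_parse_led_trigger := by
  intro raw _
  unfold Spec_parse_led_trigger parse_led_trigger parse_led_trigger_alt
  show ((PySem.Str.split₀ raw).foldl pvStepA ("", [])) = _
  rw [pv_scan_eq]
  rfl
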